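-- pv_equiv track=rewrite | github.com/kriver/aoc-2020 | day10.py | paths_for
-- ===== SOURCE A (Python) =====
-- from typing import List, Dict, Set
--
-- def count_paths(data: Dict[int, List[int]], node: int, dst: int) -> int:
--     if node == dst:
--         return 1
--     # all possible sources to reach this node
--     srcs = data[node]
--     lengths = map(lambda n: count_paths(data, n, dst), srcs)
--     # l = list(lengths)
--     return sum(lengths)
--
-- def partition_by_src(src: int, data: Dict[int, List[int]], processed: Set[int]):
--     if src not in processed:
--         processed.add(src)
--         if len(data[src]) > 1:
--             for i in data[src]:
--                 partition_by_src(i, data, processed)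
--
-- def paths_for(data: List[int]) -> int:
--     ext_data = [0] + data + [data[-1] + 3]
--     # build map of reachable nodes (reversed)
--     reverse_paths = {k: [] for k in ext_data}
--     for n in ext_data:
--         for offset in range(1, 4):
--             if n + offset in reverse_paths:
--                 reverse_paths[n + offset].append(n)
--     # partition this into sub-graphs
--     # for each sub-graph, count the paths and multiply
--     total = 1
--     processed = set()
--     for k in reversed(sorted(reverse_paths.keys())):
--         if k in processed:
--             continue
--         v = reverse_paths[k]
--         if len(v) > 1:
--             newly_processed = set()
--             partition_by_src(k, reverse_paths, newly_processed)
--             processed |= newly_processed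
--             cnt = count_paths(reverse_paths, max(newly_processed), min(newly_processed))
--             total *= cnt
--         else:
--             processed.add(k)
--     return total
-- ===== SOURCE B (Python) =====
-- def paths_for(data):
--     # Counter of extended values; no adjacency dict, no recursion, no sets:
--     # one descending index scan; each branch component [m..k] found by a
--     # bounded window walk and counted with a linear ascending DP.
--     ext = [0] + data + [data[-1] + 3]
--     cnt = {}
--     for v in ext:
--         cnt[v] = cnt.get(v, 0) + 1
--     keys = sorted(cnt)
--
--     def indeg(v, get=cnt.get):
--         return get(v - 1, 0) + get(v - 2, 0) + get(v - 3, 0)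
--
--     def min_pred(v):
--         return min(p for p in (v - 1, v - 2, v - 3) if p in cnt)
--
--     total = 1
--     i = len(keys) - 1
--     while i >= 0:
--         k = keys[i]
--         if indeg(k) > 1:
--             # walk down to find the component's lower bound m
--             lo = min_pred(k)
--             j = i - 1
--             while j >= 0 and keys[j] >= lo:
--                 v = keys[j]
--                 if indeg(v) > 1:
--                     lo = min(lo, min_pred(v))
--                 j -= 1
--             m = lo
--             # linear DP: ways to reach v from m, ascending over the component
--             ways = {m: 1}
--             for v in keys[j + 1:i + 1]:
--                 if v != m:
--                     ways[v] = sum(cnt.get(v - d, 0) * ways.get(v - d, 0)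
--                                   for d in (1, 2, 3))
--             total *= ways[k]
--             i = j
--         else:
--             i -= 1
--     return total
-- ===== Notes on version B (the rewrite author's own statement) =====
-- stated objective: faster
-- what changed: A builds a reverse-adjacency dict, recursively partitions branch sub-graphs with mutated sets, and counts each sub-graph's paths by unmemoized exponential recursion; B builds only a value counter, finds each branch component's lower bound by one bounded descending window walk over the sorted distinct values, and counts its paths with a linear ascending dynamic program, with no sets and no recursion.
import Mathlib
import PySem

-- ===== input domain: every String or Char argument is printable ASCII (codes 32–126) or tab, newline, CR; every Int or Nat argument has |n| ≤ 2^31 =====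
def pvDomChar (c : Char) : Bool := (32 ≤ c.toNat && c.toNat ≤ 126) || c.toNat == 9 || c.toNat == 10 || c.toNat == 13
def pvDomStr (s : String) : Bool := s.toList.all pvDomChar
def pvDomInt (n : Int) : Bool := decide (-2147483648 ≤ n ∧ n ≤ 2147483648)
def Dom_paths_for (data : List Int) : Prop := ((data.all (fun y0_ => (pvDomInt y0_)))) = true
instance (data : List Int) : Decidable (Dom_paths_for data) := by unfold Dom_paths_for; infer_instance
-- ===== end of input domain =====

-- B replaces A's unmemoized exponential path-count recursion and recursive sub-graph
-- partitioning by a value counter, a bounded descending window walk and a linear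
-- ascending DP over the sorted distinct values; return value proved equal on Pre_.


-- ===== PORT A =====
def countPaths (fuel : Nat) (d : PySem.Dict Int (List Int)) (node dst : Int) : Int :=
  match fuel with
  | 0 => 0
  | f + 1 =>
    if node = dst then 1
    else (((d.getD node []).map (fun n => countPaths f d n dst)).sum)

mutual
def partitionSrc (fuel : Nat) (src : Int) (d : PySem.Dict Int (List Int))
    (processed : PySem.Set Int) : PySem.Set Int :=
  match fuel with
  | 0 => processed
  | f + 1 =>
    if src ∈ processed then processed
    else
      let p1 := PySem.Set.add processed src
      if 1 < (d.getD src []).length then partitionList f (d.getD src []) d p1 else p1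
termination_by (fuel, 0)
def partitionList (fuel : Nat) (srcs : List Int) (d : PySem.Dict Int (List Int))
    (processed : PySem.Set Int) : PySem.Set Int :=
  match srcs with
  | [] => processed
  | s :: rest => partitionList fuel rest d (partitionSrc fuel s d processed)
termination_by (fuel, srcs.length + 1)
end

def rpOf (ext : List Int) : PySem.Dict Int (List Int) :=
  ext.foldl (fun d n =>
      (PySem.List.pyRange 1 4).foldl (fun d off =>
        if d.contains (n + off) then d.modify (n + off) [] (fun l => l ++ [n]) else d) d)
    (ext.foldl (fun d k => d.insert k ([] : List Int)) PySem.Dict.empty)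

def stepA (rp : PySem.Dict Int (List Int)) (st : Int × PySem.Set Int) (k : Int) :
    Int × PySem.Set Int :=
  if k ∈ st.2 then st
  else
    if 1 < (rp.getD k []).length then
      let np := partitionSrc (rp.keys.length + 2) k rp PySem.Set.empty
      (st.1 * countPaths (rp.keys.length + 2) rp ((PySem.List.max? np (fun x => x)).getD 0)
          ((PySem.List.min? np (fun x => x)).getD 0),
       PySem.Set.union st.2 np)
    else (st.1, PySem.Set.add st.2 k)

def paths_for (data : List Int) : Int :=
  match PySem.List.pyGet? data (-1) with
  | none => 0
  | some last =>
    let ext := [0] ++ data ++ [last + 3]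
    let rp := rpOf ext
    (((PySem.List.sorted rp.keys (fun x => x)).reverse.foldl (stepA rp) (1, PySem.Set.empty)).1)

-- ===== PORT B =====
def cntOf (ext : List Int) : PySem.Dict Int Int :=
  ext.foldl (fun d v => d.insert v (d.getD v 0 + 1)) PySem.Dict.empty

def indegB (cnt : PySem.Dict Int Int) (v : Int) : Int :=
  cnt.getD (v - 1) 0 + cnt.getD (v - 2) 0 + cnt.getD (v - 3) 0

def minPredB (cnt : PySem.Dict Int Int) (v : Int) : Int :=
  (PySem.List.min? (([v - 1, v - 2, v - 3]).filter (fun p => cnt.contains p)) (fun x => x)).getD 0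

def walkB (cnt : PySem.Dict Int Int) (keys : List Int) : Nat → Int → Nat × Int
  | 0, lo => (0, lo)
  | jp + 1, lo =>
    let v := PySem.List.pyGetD keys (jp : Int) 0
    if lo ≤ v then
      walkB cnt keys jp (if 1 < indegB cnt v then min lo (minPredB cnt v) else lo)
    else (jp + 1, lo)

theorem walkB_fst_le (cnt : PySem.Dict Int Int) (keys : List Int) :
    ∀ jp lo, (walkB cnt keys jp lo).1 ≤ jp := by
  intro jp
  induction jp with
  | zero => intro lo; simp [walkB]
  | succ j ih =>
    intro lo
    simp only [walkB]
    split
    · exact le_trans (ih _) (Nat.le_succ j)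
    · simp

def waysStep (cnt : PySem.Dict Int Int) (m : Int) (w : PySem.Dict Int Int) (v : Int) :
    PySem.Dict Int Int :=
  if v ≠ m then
    w.insert v ((([1, 2, 3] : List Int).map (fun dd => cnt.getD (v - dd) 0 * w.getD (v - dd) 0)).sum)
  else w

def mainB (cnt : PySem.Dict Int Int) (keys : List Int) : Nat → Int → Int
  | 0, total => total
  | ip + 1, total =>
    let k := PySem.List.pyGetD keys (ip : Int) 0
    if 1 < indegB cnt k then
      let r := walkB cnt keys ip (minPredB cnt k)
      let comp := PySem.List.slice keys (some (r.1 : Int)) (some ((ip : Int) + 1))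
      let ways := comp.foldl (waysStep cnt r.2) (PySem.Dict.empty.insert r.2 1)
      mainB cnt keys r.1 (total * ways.getD k 0)
    else mainB cnt keys ip total
termination_by ip _ => ip
decreasing_by
  · exact Nat.lt_succ_of_le (walkB_fst_le cnt keys ip (minPredB cnt k))
  · exact Nat.lt_succ_self ip

def paths_for_alt (data : List Int) : Int :=
  match PySem.List.pyGet? data (-1) with
  | none => 0
  | some last =>
    let ext := [0] ++ data ++ [last + 3]
    let cnt := cntOf ext
    let keys := PySem.List.sorted cnt.keys (fun x => x)
    mainB cnt keys keys.length 1

-- ===== PRECONDITION & SPEC =====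
-- Pre_ excludes only the empty list, on which A's read of the last element raises IndexError.
def Pre_paths_for (data : List Int) : Prop := data ≠ []
instance (data : List Int) : Decidable (Pre_paths_for data) := by unfold Pre_paths_for; infer_instance
def pvWitness_paths_for : List Int := [1, 2, 3]
def Spec_paths_for (data : List Int) (out : Int) : Prop := out = paths_for_alt data
instance (data : List Int) (out : Int) : Decidable (Spec_paths_for data out) := by unfold Spec_paths_for; infer_instance

-- ===== CLAIM (what is proved, stated in full; the proofs are below) =====
def Claim_equal_paths_for : Prop := ∀ (data : List Int), Dom_paths_for data → Pre_paths_for data → Spec_paths_for data (paths_for data)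

-- ===== LEMMAS AND PROOFS =====

-- predicate for predecessors: qf v n  ⟺  n + offset = v for some offset in {1,2,3}
def qf (v : Int) : Int → Bool := fun n => decide (v - n = 1) || decide (v - n = 2) || decide (v - n = 3)

def KS (ext : List Int) : List Int := PySem.Set.ofList ext

def bnd (ext : List Int) (v : Int) : Nat := ((KS ext).filter (fun u => decide (u ≤ v))).length

theorem cnt_getD (ext : List Int) (v : Int) : (cntOf ext).getD v 0 = (ext.count v : Int) := by
  simp [cntOf, PySem.Dict.getD_foldl_insert_add_one, PySem.Dict.getD_empty]

theorem cnt_keys (ext : List Int) : (cntOf ext).keys = KS ext := by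
  rw [cntOf, PySem.Dict.keys_foldl_insert]
  simp [PySem.Dict.keys_empty, KS]
  rfl

theorem cnt_contains (ext : List Int) (v : Int) : (cntOf ext).contains v = decide (v ∈ ext) := by
  rw [PySem.Dict.contains_eq_decide_mem_keys, cnt_keys]
  simp [KS, PySem.Set.mem_ofList]

theorem pyRange14 : PySem.List.pyRange 1 4 = [1, 2, 3] := by decide

theorem inner_keys (d : PySem.Dict Int (List Int)) (n : Int) :
    ((PySem.List.pyRange 1 4).foldl (fun d off =>
      if d.contains (n + off) then d.modify (n + off) [] (fun l => l ++ [n]) else d) d).keys = d.keys := by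
  rw [pyRange14]
  have step : ∀ (d : PySem.Dict Int (List Int)) (off : Int),
      ((if d.contains (n + off) then d.modify (n + off) [] (fun l => l ++ [n]) else d)).keys = d.keys := by
    intro d off
    split
    · rw [PySem.Dict.keys_modify, PySem.Dict.keys_insert_of_contains]
      assumption
    · rfl
  simp only [List.foldl_cons, List.foldl_nil, step]

theorem d0_getD (ext : List Int) :
    ∀ (l : List Int) (d : PySem.Dict Int (List Int)), (∀ u, d.getD u [] = []) →
      ∀ v, (l.foldl (fun d k => d.insert k ([] : List Int)) d).getD v [] = [] := by
  intro l
  induction l with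
  | nil => intro d hd v; exact hd v
  | cons a t ih =>
    intro d hd v
    simp only [List.foldl_cons]
    refine ih _ ?_ v
    intro u
    rw [PySem.Dict.getD_insert]
    split <;> simp [hd]

theorem d0_keys (ext : List Int) :
    (ext.foldl (fun d k => d.insert k ([] : List Int)) PySem.Dict.empty).keys = KS ext := by
  rw [PySem.Dict.keys_foldl_insert]
  simp [PySem.Dict.keys_empty, KS]
  rfl

theorem inner_getD (ext : List Int) (d : PySem.Dict Int (List Int)) (n : Int)
    (hk : d.keys = KS ext) (v : Int) :
    ((PySem.List.pyRange 1 4).foldl (fun d off =>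
      if d.contains (n + off) then d.modify (n + off) [] (fun l => l ++ [n]) else d) d).getD v [] =
      d.getD v [] ++ (if v ∈ ext ∧ qf v n then [n] else []) := by
  have hc : ∀ (d' : PySem.Dict Int (List Int)), d'.keys = KS ext →
      ∀ w, d'.contains w = decide (w ∈ ext) := by
    intro d' h w
    rw [PySem.Dict.contains_eq_decide_mem_keys, h]
    simp [KS, PySem.Set.mem_ofList]
  have hstepk : ∀ (d' : PySem.Dict Int (List Int)) (off : Int),
      ((if d'.contains (n + off) then d'.modify (n + off) [] (fun l => l ++ [n]) else d')).keys = d'.keys := by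
    intro d' off
    split
    · rw [PySem.Dict.keys_modify, PySem.Dict.keys_insert_of_contains]; assumption
    · rfl
  have hstep : ∀ (d' : PySem.Dict Int (List Int)), d'.keys = KS ext → ∀ off,
      ((if d'.contains (n + off) then d'.modify (n + off) [] (fun l => l ++ [n]) else d')).getD v [] =
        d'.getD v [] ++ (if v ∈ ext ∧ v = n + off then [n] else []) := by
    intro d' hk' off
    by_cases hm : v = n + off
    · rw [← hm, hc d' hk']
      by_cases hv : v ∈ ext
      · simp only [hv, decide_true, if_true, true_and, if_pos rfl]
        rw [PySem.Dict.getD_modify_self]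
      · simp [hv]
    · rw [hc d' hk']
      by_cases hv : (n + off) ∈ ext
      · simp only [hv, decide_true, if_true]
        rw [PySem.Dict.getD_modify]
        simp [hm]
      · simp [hv, hm]
  rw [pyRange14]
  simp only [List.foldl_cons, List.foldl_nil]
  set d1 := (if d.contains (n + 1) then d.modify (n + 1) [] (fun l => l ++ [n]) else d) with hd1
  have hk1 : d1.keys = KS ext := by rw [hd1, hstepk d 1, hk]
  set d2 := (if d1.contains (n + 2) then d1.modify (n + 2) [] (fun l => l ++ [n]) else d1) with hd2
  have hk2 : d2.keys = KS ext := by rw [hd2, hstepk d1 2, hk1]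
  rw [hstep d2 hk2 3, hd2, hstep d1 hk1 2, hd1, hstep d hk 1]
  simp only [List.append_assoc]
  congr 1
  by_cases h1 : v = n + 1 <;> by_cases h2 : v = n + 2 <;> by_cases h3 : v = n + 3 <;>
    first
    | omega
    | (by_cases hv : v ∈ ext <;>
        simp [h1, h2, h3, hv, qf] <;> omega)

theorem rp_keys (ext : List Int) : (rpOf ext).keys = KS ext := by
  rw [rpOf]
  have : ∀ (l : List Int) (d : PySem.Dict Int (List Int)),
      (l.foldl (fun d n => (PySem.List.pyRange 1 4).foldl (fun d off =>
        if d.contains (n + off) then d.modify (n + off) [] (fun l => l ++ [n]) else d) d) d).keys = d.keys := by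
    intro l
    induction l with
    | nil => intro d; rfl
    | cons a t ih => intro d; rw [List.foldl_cons, ih, inner_keys]
  rw [this, d0_keys]

theorem rp_build (ext : List Int) :
    ∀ (l : List Int) (d : PySem.Dict Int (List Int)), d.keys = KS ext →
      ∀ v, (l.foldl (fun d n => (PySem.List.pyRange 1 4).foldl (fun d off =>
        if d.contains (n + off) then d.modify (n + off) [] (fun l => l ++ [n]) else d) d) d).getD v [] =
        d.getD v [] ++ (if v ∈ ext then l.filter (qf v) else []) := by
  intro l
  induction l with
  | nil => intro d hk v; simp
  | cons a t ih =>
    intro d hk v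
    rw [List.foldl_cons]
    have hk' : ((PySem.List.pyRange 1 4).foldl (fun d off =>
        if d.contains (a + off) then d.modify (a + off) [] (fun l => l ++ [a]) else d) d).keys = KS ext := by
      rw [inner_keys, hk]
    rw [ih _ hk' v, inner_getD ext d a hk v]
    by_cases hv : v ∈ ext
    · simp only [hv, if_true, true_and, List.filter_cons, List.append_assoc]
      by_cases hq : qf v a <;> simp [hq]
    · simp [hv]

theorem rp_getD (ext : List Int) (v : Int) :
    (rpOf ext).getD v [] = if v ∈ ext then ext.filter (qf v) else [] := by
  have h0 : ∀ u, (ext.foldl (fun d k => d.insert k ([] : List Int)) PySem.Dict.empty).getD u [] = [] := by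
    intro u
    exact d0_getD ext ext PySem.Dict.empty (fun u => PySem.Dict.getD_empty u []) u
  rw [rpOf, rp_build ext ext _ (d0_keys ext) v, h0]
  rfl

theorem mem_rp (ext : List Int) (v p : Int) :
    p ∈ (rpOf ext).getD v [] ↔ v ∈ ext ∧ p ∈ ext ∧ (v - p = 1 ∨ v - p = 2 ∨ v - p = 3) := by
  rw [rp_getD]
  by_cases hv : v ∈ ext
  · simp only [hv, if_true, true_and, List.mem_filter, qf, Bool.or_eq_true, decide_eq_true_eq]
    tauto
  · simp [hv]

theorem filter_qf_len (l : List Int) (v : Int) :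
    (l.filter (qf v)).length = l.count (v - 1) + l.count (v - 2) + l.count (v - 3) := by
  induction l with
  | nil => simp
  | cons a t ih =>
    have e1 : (a == v - 1) = decide (a = v - 1) := by rfl
    have e2 : (a == v - 2) = decide (a = v - 2) := by rfl
    have e3 : (a == v - 3) = decide (a = v - 3) := by rfl
    simp only [List.filter_cons, List.count_cons, e1, e2, e3]
    by_cases h1 : a = v - 1 <;> by_cases h2 : a = v - 2 <;> by_cases h3 : a = v - 3 <;>
      first
        | omega
        | (have hq : qf v a = true := by simp only [qf]; simp; omega
           simp only [hq, if_true, List.length_cons, ih]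
           simp [h1, h2, h3]
           omega)
        | (have hq : qf v a = false := by simp only [qf]; simp; omega
           simp only [hq, if_false]
           simp only [h1, h2, h3, decide_false, if_false, add_zero]
           exact ih)

theorem filter_qf_mapsum (l : List Int) (v : Int) (f : Int → Int) :
    ((l.filter (qf v)).map f).sum =
      (l.count (v - 1) : Int) * f (v - 1) + (l.count (v - 2) : Int) * f (v - 2) +
        (l.count (v - 3) : Int) * f (v - 3) := by
  induction l with
  | nil => simp
  | cons a t ih =>
    have e1 : (a == v - 1) = decide (a = v - 1) := by rfl
    have e2 : (a == v - 2) = decide (a = v - 2) := by rfl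
    have e3 : (a == v - 3) = decide (a = v - 3) := by rfl
    simp only [List.filter_cons, List.count_cons, e1, e2, e3]
    by_cases h1 : a = v - 1
    · have hq : qf v a = true := by simp only [qf]; simp; omega
      have d1 : decide (a = v - 1) = true := by simp [h1]
      have d2 : decide (a = v - 2) = false := by simp; omega
      have d3 : decide (a = v - 3) = false := by simp; omega
      simp only [hq, if_true, List.map_cons, List.sum_cons, ih, d1, d2, d3, if_false, add_zero]
      rw [h1]; push_cast; ring
    · by_cases h2 : a = v - 2
      · have hq : qf v a = true := by simp only [qf]; simp; omega
        have d1 : decide (a = v - 1) = false := by simp; omega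
        have d2 : decide (a = v - 2) = true := by simp [h2]
        have d3 : decide (a = v - 3) = false := by simp; omega
        simp only [hq, if_true, List.map_cons, List.sum_cons, ih, d1, d2, d3, if_false, add_zero]
        rw [h2]; push_cast; ring
      · by_cases h3 : a = v - 3
        · have hq : qf v a = true := by simp only [qf]; simp; omega
          have d1 : decide (a = v - 1) = false := by simp; omega
          have d2 : decide (a = v - 2) = false := by simp; omega
          have d3 : decide (a = v - 3) = true := by simp [h3]
          simp only [hq, if_true, List.map_cons, List.sum_cons, ih, d1, d2, d3, if_false, add_zero]
          rw [h3]; push_cast; ring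
        · have hq : qf v a = false := by simp only [qf]; simp; omega
          have d1 : decide (a = v - 1) = false := by simp; omega
          have d2 : decide (a = v - 2) = false := by simp; omega
          have d3 : decide (a = v - 3) = false := by simp; omega
          simp only [hq, if_false, d1, d2, d3, add_zero]
          exact ih

theorem indeg_eq (ext : List Int) (v : Int) :
    indegB (cntOf ext) v = (ext.count (v - 1) : Int) + (ext.count (v - 2) : Int) + (ext.count (v - 3) : Int) := by
  simp [indegB, cnt_getD]

theorem indeg_len (ext : List Int) (v : Int) (h : v ∈ ext) :
    1 < indegB (cntOf ext) v ↔ 1 < ((rpOf ext).getD v []).length := by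
  rw [indeg_eq, rp_getD]
  simp only [h, if_true, filter_qf_len]
  constructor
  · intro hh
    have : (1 : Int) < ((ext.count (v-1) + ext.count (v-2) + ext.count (v-3) : Nat) : Int) := by push_cast; omega
    exact_mod_cast this
  · intro hh
    have : (1 : Nat) < ext.count (v-1) + ext.count (v-2) + ext.count (v-3) := hh
    push_cast
    omega

theorem minPred_spec (ext : List Int) (v : Int) (hv : v ∈ ext) (h : (rpOf ext).getD v [] ≠ []) :
    minPredB (cntOf ext) v ∈ (rpOf ext).getD v [] ∧
      ∀ p ∈ (rpOf ext).getD v [], minPredB (cntOf ext) v ≤ p := by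
  have hwin : ∀ p, p ∈ ([v - 1, v - 2, v - 3].filter (fun p => (cntOf ext).contains p)) ↔
      p ∈ (rpOf ext).getD v [] := by
    intro p
    rw [List.mem_filter, mem_rp]
    simp only [cnt_contains, decide_eq_true_eq, List.mem_cons, List.mem_singleton]
    constructor
    · rintro ⟨hp, hpe⟩
      refine ⟨hv, hpe, ?_⟩
      rcases hp with h | h | h
      · left; omega
      · right; left; omega
      · simp at h; right; right; omega
    · rintro ⟨_, hpe, hd⟩
      refine ⟨?_, hpe⟩
      rcases hd with h | h | h
      · left; omega
      · right; left; omega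
      · right; simp; omega
  obtain ⟨p0, hp0⟩ := List.exists_mem_of_ne_nil _ h
  have hwne : ([v - 1, v - 2, v - 3].filter (fun p => (cntOf ext).contains p)) ≠ [] := by
    intro hemp
    have := (hwin p0).2 hp0
    simp only [hemp] at this
    simp at this
  obtain ⟨m, hm⟩ : ∃ m, PySem.List.min? ([v - 1, v - 2, v - 3].filter (fun p => (cntOf ext).contains p)) (fun x => x) = some m := by
    cases hq : PySem.List.min? ([v - 1, v - 2, v - 3].filter (fun p => (cntOf ext).contains p)) (fun x => x) with
    | none => exact absurd ((PySem.List.min?_eq_none_iff _ _).mp hq) hwne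
    | some m => exact ⟨m, rfl⟩
  have hmb : minPredB (cntOf ext) v = m := by rw [minPredB, hm]; rfl
  rw [hmb]
  constructor
  · exact (hwin m).1 (PySem.List.min?_mem hm)
  · intro p hp
    exact PySem.List.min?_isMin hm p ((hwin p).2 hp)

-- the step relation of A's partitioning recursion
def relG (ext : List Int) (a b : Int) : Prop :=
  1 < ((rpOf ext).getD a []).length ∧ b ∈ (rpOf ext).getD a []

def ReachG (ext : List Int) (a b : Int) : Prop := Relation.ReflTransGen (relG ext) a b

def relAv (ext : List Int) (acc : List Int) (a b : Int) : Prop := relG ext a b ∧ b ∉ acc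

theorem relG_facts (ext : List Int) {a b : Int} (h : relG ext a b) :
    b ≤ a - 1 ∧ a ∈ ext ∧ b ∈ ext := by
  obtain ⟨-, hb⟩ := h
  rw [mem_rp] at hb
  exact ⟨by omega, hb.1, hb.2.1⟩

theorem reach_le (ext : List Int) {a x : Int} (h : ReachG ext a x) : x ≤ a := by
  induction h with
  | refl => exact le_rfl
  | tail _ hbc ih => have := (relG_facts ext hbc).1; omega

theorem reach_mem (ext : List Int) {a x : Int} (h : ReachG ext a x) : x = a ∨ x ∈ ext := by
  induction h with
  | refl => exact Or.inl rfl
  | tail _ hbc _ => exact Or.inr (relG_facts ext hbc).2.2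

theorem reachAv_of_reach (ext : List Int) {a x : Int}
    (h : Relation.ReflTransGen (relAv ext []) a x) : ReachG ext a x := by
  exact Relation.ReflTransGen.mono (fun p q hpq => hpq.1) h

theorem reach_of_reachAv_nil (ext : List Int) {a x : Int}
    (h : ReachG ext a x) : Relation.ReflTransGen (relAv ext []) a x := by
  exact Relation.ReflTransGen.mono (fun p q hpq => ⟨hpq, by simp⟩) h

-- cut lemma: a chain avoiding acc either avoids the larger acc2 as well, or first meets acc2
theorem cut_lemma (ext : List Int) (acc acc2 : List Int) (hsub : ∀ y, y ∈ acc → y ∈ acc2)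
    {a x : Int} (h : Relation.ReflTransGen (relAv ext acc) a x) (ha : a ∉ acc) :
    (a ∉ acc2 ∧ Relation.ReflTransGen (relAv ext acc2) a x) ∨
      ∃ c, c ∈ acc2 ∧ c ∉ acc ∧ Relation.ReflTransGen (relAv ext acc) c x := by
  induction h using Relation.ReflTransGen.head_induction_on with
  | refl =>
    by_cases hx : x ∈ acc2
    · exact Or.inr ⟨x, hx, ha, Relation.ReflTransGen.refl⟩
    · exact Or.inl ⟨hx, Relation.ReflTransGen.refl⟩
  | @head a' b' hstep hchain ih =>
    by_cases ha2 : a' ∈ acc2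
    · exact Or.inr ⟨a', ha2, ha, Relation.ReflTransGen.head hstep hchain⟩
    · rcases ih hstep.2 with ⟨hb2, hch2⟩ | ⟨c, hc2, hcacc, hch⟩
      · exact Or.inl ⟨ha2, Relation.ReflTransGen.head ⟨hstep.1, hb2⟩ hch2⟩
      · exact Or.inr ⟨c, hc2, hcacc, hch⟩

theorem relAv_mono (ext : List Int) (acc acc2 : List Int) (hsub : ∀ y, y ∈ acc → y ∈ acc2)
    {a x : Int} (h : Relation.ReflTransGen (relAv ext acc2) a x) :
    Relation.ReflTransGen (relAv ext acc) a x := by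
  exact Relation.ReflTransGen.mono (fun p q hpq => ⟨hpq.1, fun hin => hpq.2 (hsub q hin)⟩) h

-- crossing: any key lying between a chain's endpoints is itself reachable
theorem exists_cross (ext : List Int) {a x lo : Int} (h : ReachG ext a x) (hx : x < lo)
    (ha : lo ≤ a) : ∃ u w, relG ext u w ∧ lo ≤ u ∧ w < lo ∧ ReachG ext a u := by
  induction h with
  | refl => omega
  | @tail b c hab hbc ih =>
    by_cases hb : lo ≤ b
    · exact ⟨b, c, hbc, hb, hx, hab⟩
    · exact ih (by omega)

theorem crossing (ext : List Int) {k m x : Int} (h : ReachG ext k m) (hx : x ∈ ext)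
    (h1 : m ≤ x) (h2 : x ≤ k) : ReachG ext k x := by
  have main : ∀ a, Relation.ReflTransGen (relG ext) a m →
      ReachG ext k a → x ≤ a → ReachG ext k x := by
    intro a ha
    induction ha using Relation.ReflTransGen.head_induction_on with
    | refl => intro hka hxa; have : x = m := by omega
              rw [this]; exact hka
    | @head a' b' hstep hchain ih =>
      intro hka hxa
      by_cases hxeq : x = a'
      · rw [hxeq]; exact hka
      · have hkb : ReachG ext k b' := Relation.ReflTransGen.tail hka hstep
        by_cases hxb : x ≤ b'
        · exact ih hkb hxb
        · -- b' < x < a' : x lies in a''s window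
          have hf := relG_facts ext hstep
          have hmem : b' ∈ (rpOf ext).getD a' [] := hstep.2
          rw [mem_rp] at hmem
          have hxmem : x ∈ (rpOf ext).getD a' [] := by
            rw [mem_rp]
            exact ⟨hmem.1, hx, by omega⟩
          exact Relation.ReflTransGen.tail hka ⟨hstep.1, hxmem⟩
  exact main k h Relation.ReflTransGen.refl h2

theorem filter_le_mono (l : List Int) (p s : Int) (hps : p ≤ s) :
    (l.filter (fun u => decide (u ≤ p))).length ≤ (l.filter (fun u => decide (u ≤ s))).length := by
  induction l with
  | nil => simp
  | cons a t ih =>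
    simp only [List.filter_cons]
    by_cases h1 : a ≤ p
    · have h2 : a ≤ s := by omega
      simp [h1, h2]
      omega
    · by_cases h2 : a ≤ s <;> simp [h1, h2] <;> omega

theorem bnd_lt_aux (l : List Int) {p s : Int} (hs : s ∈ l) (hps : p < s) :
    (l.filter (fun u => decide (u ≤ p))).length < (l.filter (fun u => decide (u ≤ s))).length := by
  induction l with
  | nil => simp at hs
  | cons a t ih =>
    simp only [List.filter_cons]
    by_cases heq : a = s
    · have h1 : ¬ (a ≤ p) := by omega
      have h2 : a ≤ s := by omega
      simp [h1, h2]
      have := filter_le_mono t p s (by omega)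
      omega
    · have hst : s ∈ t := by
        rcases List.mem_cons.mp hs with h | h
        · exact absurd h.symm heq
        · exact h
      have hlt := ih hst
      by_cases h1 : a ≤ p
      · have h2 : a ≤ s := by omega
        simp [h1, h2]
        omega
      · by_cases h2 : a ≤ s <;> simp [h1, h2] <;> omega

theorem bnd_lt (ext : List Int) {p s : Int} (hs : s ∈ KS ext) (hps : p < s) :
    bnd ext p < bnd ext s := by
  exact bnd_lt_aux (KS ext) hs hps

theorem avoid_add (ext : List Int) (acc : List Int) (s : Int) :
    ∀ {b x : Int}, Relation.ReflTransGen (relAv ext acc) b x → b < s →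
      Relation.ReflTransGen (relAv ext (PySem.Set.add acc s)) b x := by
  intro b x h
  induction h using Relation.ReflTransGen.head_induction_on with
  | refl => intro _; exact Relation.ReflTransGen.refl
  | @head b' c' hstep hchain ih =>
    intro hbs
    have hc : c' ≤ b' - 1 := (relG_facts ext hstep.1).1
    refine Relation.ReflTransGen.head ⟨hstep.1, ?_⟩ (ih (by omega))
    intro hc2
    rcases (PySem.Set.mem_add _ _ _).mp hc2 with h | rfl
    · exact hstep.2 h
    · omega

theorem partition_mono_gen (d : PySem.Dict Int (List Int)) :
    ∀ fuel, (∀ src proc x, x ∈ proc → x ∈ partitionSrc fuel src d proc) ∧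
      (∀ srcs proc x, x ∈ proc → x ∈ partitionList fuel srcs d proc) := by
  intro fuel
  induction fuel with
  | zero =>
    have hsrc : ∀ src proc x, x ∈ proc → x ∈ partitionSrc 0 src d proc := by
      intro src proc x hx; simpa [partitionSrc] using hx
    refine ⟨hsrc, ?_⟩
    intro srcs
    induction srcs with
    | nil => intro proc x hx; simpa [partitionList] using hx
    | cons s rest ih =>
      intro proc x hx
      simp only [partitionList]
      exact ih _ _ (hsrc _ _ _ hx)
  | succ f ihf =>
    have hsrc : ∀ src proc x, x ∈ proc → x ∈ partitionSrc (f + 1) src d proc := by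
      intro src proc x hx
      simp only [partitionSrc]
      split
      · exact hx
      · have hx1 : x ∈ PySem.Set.add proc src := (PySem.Set.mem_add _ _ _).mpr (Or.inl hx)
        split
        · exact ihf.2 _ _ _ hx1
        · exact hx1
    refine ⟨hsrc, ?_⟩
    intro srcs
    induction srcs with
    | nil => intro proc x hx; simpa [partitionList] using hx
    | cons s rest ih =>
      intro proc x hx
      simp only [partitionList]
      exact ih _ _ (hsrc _ _ _ hx)

theorem partition_spec (ext : List Int) :
    ∀ fuel,
      (∀ src proc x, bnd ext src < fuel →
        (x ∈ partitionSrc fuel src (rpOf ext) proc ↔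
          x ∈ proc ∨ (src ∉ proc ∧ Relation.ReflTransGen (relAv ext proc) src x))) ∧
      (∀ srcs proc x, (∀ s ∈ srcs, bnd ext s < fuel) →
        (x ∈ partitionList fuel srcs (rpOf ext) proc ↔
          x ∈ proc ∨ ∃ s ∈ srcs, s ∉ proc ∧ Relation.ReflTransGen (relAv ext proc) s x)) := by
  intro fuel
  induction fuel with
  | zero =>
    have hsrc : ∀ src proc x, bnd ext src < 0 →
        (x ∈ partitionSrc 0 src (rpOf ext) proc ↔
          x ∈ proc ∨ (src ∉ proc ∧ Relation.ReflTransGen (relAv ext proc) src x)) := by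
      intro src proc x hf; omega
    refine ⟨hsrc, ?_⟩
    intro srcs proc x hf
    cases srcs with
    | nil => simp [partitionList]
    | cons s rest => exact absurd (hf s (List.mem_cons_self ..)) (by omega)
  | succ f ihf =>
    have hsrc : ∀ src proc x, bnd ext src < f + 1 →
        (x ∈ partitionSrc (f + 1) src (rpOf ext) proc ↔
          x ∈ proc ∨ (src ∉ proc ∧ Relation.ReflTransGen (relAv ext proc) src x)) := by
      intro src proc x hf
      simp only [partitionSrc]
      by_cases hsp : src ∈ proc
      · rw [if_pos hsp]
        constructor
        · exact Or.inl
        · rintro (h | ⟨h1, -⟩)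
          · exact h
          · exact absurd hsp h1
      · rw [if_neg hsp]
        by_cases hexp : 1 < ((rpOf ext).getD src []).length
        · rw [if_pos hexp]
          have hKsrc : src ∈ ext := by
            by_contra hno
            rw [rp_getD, if_neg hno] at hexp
            simp at hexp
          have hfuel' : ∀ p ∈ (rpOf ext).getD src [], bnd ext p < f := by
            intro p hp
            have hm := (mem_rp ext src p).mp hp
            have hlt := bnd_lt ext (p := p) (s := src)
              ((PySem.Set.mem_ofList ext src).mpr hKsrc) (by omega)
            omega
          rw [ihf.2 _ _ x hfuel']
          constructor
          · rintro (hx1 | ⟨t, ht, htp, hch⟩)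
            · rcases (PySem.Set.mem_add _ _ _).mp hx1 with h | rfl
              · exact Or.inl h
              · exact Or.inr ⟨hsp, Relation.ReflTransGen.refl⟩
            · have htne : t ∉ proc := fun hc => htp ((PySem.Set.mem_add _ _ _).mpr (Or.inl hc))
              have hch' : Relation.ReflTransGen (relAv ext proc) t x :=
                relAv_mono ext proc _ (fun y hy => (PySem.Set.mem_add _ _ _).mpr (Or.inl hy)) hch
              exact Or.inr ⟨hsp, Relation.ReflTransGen.head ⟨⟨hexp, ht⟩, htne⟩ hch'⟩
          · rintro (hx | ⟨-, hch⟩)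
            · exact Or.inl ((PySem.Set.mem_add _ _ _).mpr (Or.inl hx))
            · rcases Relation.ReflTransGen.cases_head hch with rfl | ⟨c, hstep, hch'⟩
              · exact Or.inl ((PySem.Set.mem_add _ _ _).mpr (Or.inr rfl))
              · have hcf := relG_facts ext hstep.1
                have hcs : c < src := by have := hcf.1; omega
                have hch2 : Relation.ReflTransGen (relAv ext (PySem.Set.add proc src)) c x :=
                  avoid_add ext proc src hch' hcs
                refine Or.inr ⟨c, hstep.1.2, ?_, hch2⟩
                intro hc
                rcases (PySem.Set.mem_add _ _ _).mp hc with h | rfl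
                · exact hstep.2 h
                · omega
        · rw [if_neg hexp]
          constructor
          · intro hx
            rcases (PySem.Set.mem_add _ _ _).mp hx with h | rfl
            · exact Or.inl h
            · exact Or.inr ⟨hsp, Relation.ReflTransGen.refl⟩
          · rintro (hx | ⟨-, hch⟩)
            · exact (PySem.Set.mem_add _ _ _).mpr (Or.inl hx)
            · rcases Relation.ReflTransGen.cases_head hch with rfl | ⟨c, hstep, -⟩
              · exact (PySem.Set.mem_add _ _ _).mpr (Or.inr rfl)
              · exact absurd hstep.1.1 hexp
    refine ⟨hsrc, ?_⟩
    intro srcs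
    induction srcs with
    | nil => intro proc x hf; simp [partitionList]
    | cons s rest ih =>
      intro proc x hf
      simp only [partitionList]
      have hsub : ∀ y, y ∈ proc → y ∈ partitionSrc (f + 1) s (rpOf ext) proc :=
        fun y hy => (partition_mono_gen _ (f + 1)).1 _ _ _ hy
      have iffS : ∀ z, z ∈ partitionSrc (f + 1) s (rpOf ext) proc ↔
          z ∈ proc ∨ (s ∉ proc ∧ Relation.ReflTransGen (relAv ext proc) s z) :=
        fun z => hsrc s proc z (hf s (List.mem_cons_self ..))
      rw [ih _ x (fun t ht => hf t (List.mem_cons_of_mem _ ht))]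
      constructor
      · rintro (hx1 | ⟨t, ht, htp, hch⟩)
        · rcases (iffS x).mp hx1 with h | ⟨h1, h2⟩
          · exact Or.inl h
          · exact Or.inr ⟨s, List.mem_cons_self .., h1, h2⟩
        · exact Or.inr ⟨t, List.mem_cons_of_mem _ ht, fun hc => htp (hsub _ hc),
            relAv_mono ext proc _ hsub hch⟩
      · rintro (hx | ⟨u, hu, hup, hch⟩)
        · exact Or.inl (hsub _ hx)
        · rcases List.mem_cons.mp hu with rfl | hurest
          · exact Or.inl ((iffS x).mpr (Or.inr ⟨hup, hch⟩))
          · rcases cut_lemma ext proc _ hsub hch hup with ⟨hu2, hch2⟩ | ⟨c, hc2, hcp, hchc⟩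
            · exact Or.inr ⟨u, hurest, hu2, hch2⟩
            · rcases (iffS c).mp hc2 with h | ⟨h1, h2⟩
              · exact absurd h hcp
              · exact Or.inl ((iffS x).mpr (Or.inr ⟨h1, h2.trans hchc⟩))

theorem count_fuel_eq (ext : List Int) :
    ∀ f1 f2 node dst, bnd ext node < f1 → bnd ext node < f2 →
      countPaths f1 (rpOf ext) node dst = countPaths f2 (rpOf ext) node dst := by
  intro f1
  induction f1 with
  | zero => intro f2 node dst h1 h2; omega
  | succ n ih =>
    intro f2 node dst h1 h2
    cases f2 with
    | zero => omega
    | succ m =>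
      simp only [countPaths]
      by_cases hnd : node = dst
      · simp [hnd]
      · rw [if_neg hnd, if_neg hnd]
        congr 1
        apply List.map_congr_left
        intro p hp
        have hm := (mem_rp ext node p).mp hp
        have hnode : node ∈ KS ext := (PySem.Set.mem_ofList ext node).mpr hm.1
        have hblt := bnd_lt ext hnode (p := p) (by omega)
        exact ih m p dst (by omega) (by omega)

theorem count_lt_zero (ext : List Int) :
    ∀ fuel p dst, p < dst → countPaths fuel (rpOf ext) p dst = 0 := by
  intro fuel
  induction fuel with
  | zero => intro p dst h; rfl
  | succ f ih =>
    intro p dst h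
    simp only [countPaths]
    rw [if_neg (by omega)]
    have : ∀ q ∈ (rpOf ext).getD p [], countPaths f (rpOf ext) q dst = 0 := by
      intro q hq
      have hm := (mem_rp ext p q).mp hq
      exact ih q dst (by omega)
    rw [List.map_congr_left this]
    simp

def countF (ext : List Int) (dst v : Int) : Int := countPaths (bnd ext v + 1) (rpOf ext) v dst

theorem countF_self (ext : List Int) (dst : Int) : countF ext dst dst = 1 := by
  simp [countF, countPaths]

theorem countF_rec (ext : List Int) (dst v : Int) (hv : v ∈ ext) (hne : v ≠ dst) :
    countF ext dst v =
      (ext.count (v - 1) : Int) * countF ext dst (v - 1) +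
        (ext.count (v - 2) : Int) * countF ext dst (v - 2) +
        (ext.count (v - 3) : Int) * countF ext dst (v - 3) := by
  rw [countF]
  simp only [countPaths]
  rw [if_neg hne]
  have hgd : (rpOf ext).getD v [] = ext.filter (qf v) := by rw [rp_getD, if_pos hv]
  have hstep : ∀ p ∈ (rpOf ext).getD v [], countPaths (bnd ext v) (rpOf ext) p dst = countF ext dst p := by
    intro p hp
    have hm := (mem_rp ext v p).mp hp
    have hvK : v ∈ KS ext := (PySem.Set.mem_ofList ext v).mpr hv
    have hblt := bnd_lt ext hvK (p := p) (by omega)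
    exact count_fuel_eq ext (bnd ext v) (bnd ext p + 1) p dst (by omega) (by omega)
  rw [List.map_congr_left hstep, hgd]
  exact filter_qf_mapsum ext v (fun n => countF ext dst n)

theorem countA_eq_countF (ext : List Int) (f : Nat) (node dst : Int) (h : bnd ext node < f) :
    countPaths f (rpOf ext) node dst = countF ext dst node := by
  exact count_fuel_eq ext f (bnd ext node + 1) node dst h (by omega)

def skeys (ext : List Int) : List Int := PySem.List.sorted (KS ext) (fun x => x)

theorem skeys_nodup (ext : List Int) : (skeys ext).Nodup := by
  exact (PySem.List.sorted_perm (KS ext) (fun x => x) false).nodup_iff.mpr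
    (PySem.Set.nodup_ofList ext)

theorem mem_skeys (ext : List Int) (x : Int) : x ∈ skeys ext ↔ x ∈ ext := by
  rw [skeys, (PySem.List.sorted_perm (KS ext) (fun x => x) false).mem_iff]
  exact PySem.Set.mem_ofList ext x

theorem skeys_lt (ext : List Int) : (skeys ext).Pairwise (· < ·) := by
  have h1 : (skeys ext).Pairwise (· ≤ ·) := PySem.List.sorted_pairwise (KS ext) (fun x => x)
  have h2 : (skeys ext).Pairwise (· ≠ ·) := skeys_nodup ext
  exact (h1.and h2).imp (fun h => lt_of_le_of_ne h.1 h.2)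

theorem skeys_getD_lt (ext : List Int) {i j : Nat} (hij : i < j)
    (hj : j < (skeys ext).length) : (skeys ext).getD i 0 < (skeys ext).getD j 0 := by
  have hi : i < (skeys ext).length := by omega
  rw [List.getD_eq_getElem _ _ hi, List.getD_eq_getElem _ _ hj]
  exact List.pairwise_iff_getElem.mp (skeys_lt ext) i j hi hj hij

theorem skip_fold (rp : PySem.Dict Int (List Int)) (l : List Int) (t : Int)
    (proc : PySem.Set Int) (h : ∀ x ∈ l, x ∈ proc) :
    l.foldl (stepA rp) (t, proc) = (t, proc) := by
  induction l with
  | nil => rfl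
  | cons a r ih =>
    rw [List.foldl_cons]
    have ha : stepA rp (t, proc) a = (t, proc) := by
      rw [stepA, if_pos (h a (List.mem_cons_self ..))]
    rw [ha]
    exact ih (fun x hx => h x (List.mem_cons_of_mem _ hx))

def npOf (ext : List Int) (k : Int) : PySem.Set Int :=
  partitionSrc ((KS ext).length + 2) k (rpOf ext) PySem.Set.empty

def mCOf (ext : List Int) (k : Int) : Int :=
  (PySem.List.min? (npOf ext k) (fun x => x)).getD 0

theorem np_mem (ext : List Int) (k x : Int) : x ∈ npOf ext k ↔ ReachG ext k x := by
  rw [npOf]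
  have hb : bnd ext k < (KS ext).length + 2 := by
    have := List.length_filter_le (fun u => decide (u ≤ k)) (KS ext)
    simp only [bnd]
    omega
  rw [(partition_spec ext ((KS ext).length + 2)).1 k PySem.Set.empty x hb]
  constructor
  · rintro (h | ⟨-, h⟩)
    · simp [PySem.Set.empty] at h
    · exact reachAv_of_reach ext h
  · intro h
    exact Or.inr ⟨by simp [PySem.Set.empty], reach_of_reachAv_nil ext h⟩

theorem np_max (ext : List Int) (k : Int) :
    (PySem.List.max? (npOf ext k) (fun x => x)).getD 0 = k := by
  have hk : k ∈ npOf ext k := (np_mem ext k k).mpr Relation.ReflTransGen.refl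
  obtain ⟨m, hm⟩ : ∃ m, PySem.List.max? (npOf ext k) (fun x => x) = some m := by
    cases hq : PySem.List.max? (npOf ext k) (fun x => x) with
    | none =>
      rw [PySem.List.max?_eq_none_iff] at hq
      rw [hq] at hk
      simp at hk
    | some m => exact ⟨m, rfl⟩
  rw [hm]
  have h1 : k ≤ m := PySem.List.max?_isMax hm k hk
  have h2 : m ≤ k := reach_le ext ((np_mem ext k m).mp (PySem.List.max?_mem hm))
  simpa using le_antisymm h2 h1

theorem mC_spec (ext : List Int) (k : Int) :
    ReachG ext k (mCOf ext k) ∧ ∀ x, ReachG ext k x → mCOf ext k ≤ x := by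
  have hk : k ∈ npOf ext k := (np_mem ext k k).mpr Relation.ReflTransGen.refl
  obtain ⟨m, hm⟩ : ∃ m, PySem.List.min? (npOf ext k) (fun x => x) = some m := by
    cases hq : PySem.List.min? (npOf ext k) (fun x => x) with
    | none =>
      rw [PySem.List.min?_eq_none_iff] at hq
      rw [hq] at hk
      simp at hk
    | some m => exact ⟨m, rfl⟩
  have hmc : mCOf ext k = m := by rw [mCOf, hm]; rfl
  rw [hmc]
  refine ⟨(np_mem ext k m).mp (PySem.List.min?_mem hm), ?_⟩
  intro x hx
  exact PySem.List.min?_isMin hm x ((np_mem ext k x).mpr hx)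

theorem np_interval (ext : List Int) (k : Int) (hk : k ∈ ext)
    (hb : 1 < ((rpOf ext).getD k []).length) (x : Int) :
    ReachG ext k x ↔ x ∈ ext ∧ mCOf ext k ≤ x ∧ x ≤ k := by
  constructor
  · intro h
    refine ⟨?_, (mC_spec ext k).2 x h, reach_le ext h⟩
    rcases reach_mem ext h with rfl | hx
    · exact hk
    · exact hx
  · rintro ⟨hx, h1, h2⟩
    exact crossing ext (mC_spec ext k).1 hx h1 h2

theorem walk_spec (ext : List Int) (ip : Nat) (hip : ip < (skeys ext).length)
    (hb : 1 < ((rpOf ext).getD ((skeys ext).getD ip 0) []).length) :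
    ∀ jp lo, jp ≤ ip → ReachG ext ((skeys ext).getD ip 0) lo →
      lo ≤ minPredB (cntOf ext) ((skeys ext).getD ip 0) →
      (∀ idx, jp ≤ idx → idx < ip →
        1 < indegB (cntOf ext) ((skeys ext).getD idx 0) →
          lo ≤ minPredB (cntOf ext) ((skeys ext).getD idx 0)) →
      (walkB (cntOf ext) (skeys ext) jp lo).1 ≤ jp ∧
      (walkB (cntOf ext) (skeys ext) jp lo).2 ≤ lo ∧
      ReachG ext ((skeys ext).getD ip 0) (walkB (cntOf ext) (skeys ext) jp lo).2 ∧
      (∀ idx, (walkB (cntOf ext) (skeys ext) jp lo).1 ≤ idx → idx < ip →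
        1 < indegB (cntOf ext) ((skeys ext).getD idx 0) →
          (walkB (cntOf ext) (skeys ext) jp lo).2 ≤ minPredB (cntOf ext) ((skeys ext).getD idx 0)) ∧
      (∀ idx, (walkB (cntOf ext) (skeys ext) jp lo).1 ≤ idx → idx < jp →
        (walkB (cntOf ext) (skeys ext) jp lo).2 ≤ (skeys ext).getD idx 0) ∧
      ((walkB (cntOf ext) (skeys ext) jp lo).1 = 0 ∨
        (skeys ext).getD ((walkB (cntOf ext) (skeys ext) jp lo).1 - 1) 0 <
          (walkB (cntOf ext) (skeys ext) jp lo).2) := by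
  have hkext : (skeys ext).getD ip 0 ∈ ext := by
    by_contra hno
    rw [rp_getD, if_neg hno] at hb
    simp at hb
  set K := skeys ext with hK
  set k := K.getD ip 0 with hkdef
  intro jp
  induction jp with
  | zero =>
    intro lo _ hreach _ hH
    simp only [walkB]
    refine ⟨le_rfl, le_rfl, hreach, ?_, ?_, Or.inl trivial⟩
    · intro idx h1 h2 h3; exact hH idx (by omega) h2 h3
    · intro idx h1 h2; omega
  | succ jp ih =>
    intro lo hjp hreach hmpk hH
    have hjlen : jp < K.length := by omega
    have hv : PySem.List.pyGetD K (jp : Int) 0 = K.getD jp 0 := PySem.List.pyGetD_natCast K jp 0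
    by_cases hcase : lo ≤ K.getD jp 0
    · -- continue walking
      set v := K.getD jp 0 with hvdef
      set lo' := if 1 < indegB (cntOf ext) v then min lo (minPredB (cntOf ext) v) else lo with hlo'
      have hred : walkB (cntOf ext) K (jp + 1) lo = walkB (cntOf ext) K jp lo' := by
        simp only [walkB, hv]
        rw [if_pos hcase]
      have hlo'le : lo' ≤ lo := by
        rw [hlo']; split
        · exact min_le_left _ _
        · exact le_rfl
      have hvk : v < k := by
        rw [hvdef, hkdef, hK]
        exact skeys_getD_lt ext (by omega) hip
      have hvext : v ∈ ext := by
        rw [← mem_skeys ext v, hvdef, hK]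
        rw [List.getD_eq_getElem _ _ (by rw [← hK]; omega)]
        exact List.getElem_mem _
      have hreach' : ReachG ext k lo' := by
        rw [hlo']
        split
        · rename_i hindeg
          have hlen : 1 < ((rpOf ext).getD v []).length := (indeg_len ext v hvext).mp hindeg
          have hreachv : ReachG ext k v := by
            rw [np_interval ext k hkext hb v]
            exact ⟨hvext, le_trans ((mC_spec ext k).2 lo hreach) hcase, le_of_lt hvk⟩
          have hne : (rpOf ext).getD v [] ≠ [] := by
            intro hc; rw [hc] at hlen; simp at hlen
          obtain ⟨hmem, -⟩ := minPred_spec ext v hvext hne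
          have hmp : ReachG ext k (minPredB (cntOf ext) v) :=
            Relation.ReflTransGen.tail hreachv ⟨hlen, hmem⟩
          rcases min_cases lo (minPredB (cntOf ext) v) with ⟨heq, -⟩ | ⟨heq, -⟩ <;> rw [heq]
          · exact hreach
          · exact hmp
        · exact hreach
      have hH' : ∀ idx, jp ≤ idx → idx < ip →
          1 < indegB (cntOf ext) (K.getD idx 0) →
            lo' ≤ minPredB (cntOf ext) (K.getD idx 0) := by
        intro idx h1 h2 h3
        rcases Nat.eq_or_lt_of_le h1 with rfl | hlt
        · rw [hlo']
          rw [if_pos h3]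
          exact min_le_right _ _
        · exact le_trans hlo'le (hH idx (by omega) h2 h3)
      have := ih lo' (by omega) hreach' (le_trans hlo'le hmpk) hH'
      rw [hred]
      refine ⟨by omega, le_trans this.2.1 hlo'le, this.2.2.1, this.2.2.2.1, ?_, this.2.2.2.2.2⟩
      intro idx h1 h2
      rcases Nat.lt_or_ge idx jp with hlt | hge
      · exact this.2.2.2.2.1 idx h1 hlt
      · have hidx : idx = jp := by omega
        rw [hidx]
        exact le_trans (le_trans this.2.1 hlo'le) hcase
    · -- stop
      have hred : walkB (cntOf ext) K (jp + 1) lo = (jp + 1, lo) := by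
        simp only [walkB, hv]
        rw [if_neg hcase]
      rw [hred]
      refine ⟨le_rfl, le_rfl, hreach, ?_, ?_, ?_⟩
      · intro idx h1 h2 h3; exact hH idx (by omega) h2 h3
      · intro idx h1 h2; omega
      · right
        simpa using lt_of_not_ge hcase

theorem dp_spec (ext : List Int) (k mC : Int) (comp : List Int)
    (hmem : ∀ x, x ∈ comp ↔ x ∈ ext ∧ mC ≤ x ∧ x ≤ k)
    (hsrt : comp.Pairwise (· < ·)) :
    ∀ l2 l1 w, comp = l1 ++ l2 →
      (∀ u, w.getD u 0 = if u = mC ∨ u ∈ l1 then countF ext mC u else 0) →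
      ∀ u, (l2.foldl (waysStep (cntOf ext) mC) w).getD u 0 =
        if u = mC ∨ u ∈ l1 ++ l2 then countF ext mC u else 0 := by
  intro l2
  induction l2 with
  | nil =>
    intro l1 w hsplit hw u
    simpa using hw u
  | cons v l2' ih =>
    intro l1 w hsplit hw u
    rw [List.foldl_cons]
    have hvcomp : v ∈ comp := by rw [hsplit]; simp
    obtain ⟨hvext, hvmC, hvk⟩ := (hmem v).mp hvcomp
    have hpair : ∀ x ∈ l2', v < x := by
      have h1 := (List.pairwise_append.mp (hsplit ▸ hsrt)).2.1
      exact (List.pairwise_cons.mp h1).1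
    have hl1lt : ∀ x ∈ l1, x < v := by
      intro x hx
      have h2 := (List.pairwise_append.mp (hsplit ▸ hsrt)).2.2
      exact h2 x hx v (by simp)
    have hw' : ∀ u, (waysStep (cntOf ext) mC w v).getD u 0 =
        if u = mC ∨ u ∈ l1 ++ [v] then countF ext mC u else 0 := by
      intro u
      rw [waysStep]
      by_cases hveq : v ≠ mC
      · rw [if_pos hveq]
        rw [PySem.Dict.getD_insert]
        by_cases huv : u = v
        · rw [if_pos huv, huv]
          have hcond : v = mC ∨ v ∈ l1 ++ [v] := by right; simp
          rw [if_pos hcond]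
          rw [countF_rec ext mC v hvext hveq]
          simp only [List.map_cons, List.map_nil, List.sum_cons, List.sum_nil]
          have hterm : ∀ dd : Int, dd = 1 ∨ dd = 2 ∨ dd = 3 →
              (cntOf ext).getD (v - dd) 0 * w.getD (v - dd) 0 =
                (ext.count (v - dd) : Int) * countF ext mC (v - dd) := by
            intro dd hdd
            rw [cnt_getD, hw (v - dd)]
            by_cases hcond2 : v - dd = mC ∨ v - dd ∈ l1
            · rw [if_pos hcond2]
            · rw [if_neg hcond2]
              by_cases hdext : (v - dd) ∈ ext
              · by_cases hdlt : v - dd < mC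
                · have : countF ext mC (v - dd) = 0 :=
                    count_lt_zero ext _ _ _ hdlt
                  simp [this]
                · exfalso
                  have hdcomp : v - dd ∈ comp := (hmem _).mpr ⟨hdext, by omega, by omega⟩
                  rw [hsplit] at hdcomp
                  rcases List.mem_append.mp hdcomp with h | h
                  · exact hcond2 (Or.inr h)
                  · rcases List.mem_cons.mp h with h' | h'
                    · omega
                    · have := hpair _ h'; omega
              · have : ext.count (v - dd) = 0 := List.count_eq_zero.mpr hdext
                rw [this]
                simp
          rw [hterm 1 (by omega), hterm 2 (by omega), hterm 3 (by omega)]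
          ring
        · rw [if_neg huv, hw u]
          have : (u = mC ∨ u ∈ l1 ++ [v]) ↔ (u = mC ∨ u ∈ l1) := by
            simp only [List.mem_append, List.mem_singleton]
            tauto
          rw [if_congr this rfl rfl]
      · rw [if_neg hveq]
        push_neg at hveq
        rw [hw u]
        have : (u = mC ∨ u ∈ l1 ++ [v]) ↔ (u = mC ∨ u ∈ l1) := by
          simp only [List.mem_append, List.mem_singleton, hveq]
          tauto
        rw [if_congr this rfl rfl]
    have hsplit' : comp = (l1 ++ [v]) ++ l2' := by rw [hsplit]; simp
    have := ih (l1 ++ [v]) _ hsplit' hw' u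
    rw [this]
    have hiff : (u = mC ∨ u ∈ (l1 ++ [v]) ++ l2') ↔ (u = mC ∨ u ∈ l1 ++ v :: l2') := by
      simp only [List.mem_append, List.mem_singleton, List.mem_cons]
      tauto
    rw [if_congr hiff rfl rfl]

theorem getD_mem_ext (ext : List Int) (j : Nat) (hj : j < (skeys ext).length) :
    (skeys ext).getD j 0 ∈ ext := by
  rw [List.getD_eq_getElem _ _ hj]
  exact (mem_skeys ext _).mp (List.getElem_mem _)

theorem skeys_getD_le (ext : List Int) {i j : Nat} (hij : i ≤ j)
    (hj : j < (skeys ext).length) : (skeys ext).getD i 0 ≤ (skeys ext).getD j 0 := by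
  rcases Nat.eq_or_lt_of_le hij with rfl | h
  · exact le_rfl
  · exact le_of_lt (skeys_getD_lt ext h hj)

theorem exists_idx (ext : List Int) {x : Int} (h : x ∈ skeys ext) :
    ∃ j, j < (skeys ext).length ∧ (skeys ext).getD j 0 = x := by
  obtain ⟨j, hj, hx⟩ := List.mem_iff_getElem.mp h
  exact ⟨j, hj, by rw [List.getD_eq_getElem _ _ hj]; exact hx⟩

theorem mem_drop_iff (ext : List Int) (n : Nat) (x : Int) :
    x ∈ (skeys ext).drop n ↔
      ∃ j, n ≤ j ∧ j < (skeys ext).length ∧ (skeys ext).getD j 0 = x := by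
  constructor
  · intro h
    obtain ⟨i, hi, hx⟩ := List.mem_iff_getElem.mp h
    rw [List.getElem_drop] at hx
    have hlen : n + i < (skeys ext).length := by
      have := List.length_drop (l := skeys ext) (i := n)
      omega
    refine ⟨n + i, by omega, hlen, ?_⟩
    rw [List.getD_eq_getElem _ _ hlen]
    exact hx
  · rintro ⟨j, hnj, hj, hx⟩
    have hlen : j - n < ((skeys ext).drop n).length := by
      rw [List.length_drop]; omega
    refine List.mem_iff_getElem.mpr ⟨j - n, hlen, ?_⟩
    rw [List.getElem_drop]
    rw [List.getD_eq_getElem _ _ hj] at hx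
    have : n + (j - n) = j := by omega
    simp_rw [this]
    exact hx

theorem mem_take_drop_iff (ext : List Int) (a c : Nat) (x : Int) :
    x ∈ ((skeys ext).drop a).take c ↔
      ∃ j, a ≤ j ∧ j < a + c ∧ j < (skeys ext).length ∧ (skeys ext).getD j 0 = x := by
  constructor
  · intro h
    obtain ⟨i, hi, hx⟩ := List.mem_iff_getElem.mp h
    have hi2 : i < ((skeys ext).drop a).length := by
      have := List.length_take_le c ((skeys ext).drop a)
      have h3 := hi
      rw [List.length_take] at h3
      omega
    have hic : i < c := by
      have h3 := hi; rw [List.length_take] at h3; omega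
    rw [List.getElem_take, List.getElem_drop] at hx
    have hlen : a + i < (skeys ext).length := by
      have := List.length_drop (l := skeys ext) (i := a)
      omega
    refine ⟨a + i, by omega, by omega, hlen, ?_⟩
    rw [List.getD_eq_getElem _ _ hlen]
    exact hx
  · rintro ⟨j, haj, hjc, hj, hx⟩
    have hlen1 : j - a < ((skeys ext).drop a).length := by rw [List.length_drop]; omega
    have hlen : j - a < (((skeys ext).drop a).take c).length := by
      rw [List.length_take]
      omega
    refine List.mem_iff_getElem.mpr ⟨j - a, hlen, ?_⟩
    rw [List.getElem_take, List.getElem_drop]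
    rw [List.getD_eq_getElem _ _ hj] at hx
    have : a + (j - a) = j := by omega
    simp_rw [this]
    exact hx

theorem main_eq (ext : List Int) :
    ∀ ip, ip ≤ (skeys ext).length → ∀ t proc,
      (∀ x, x ∈ proc ↔ x ∈ (skeys ext).drop ip) →
      (((skeys ext).take ip).reverse.foldl (stepA (rpOf ext)) (t, proc)).1 =
        mainB (cntOf ext) (skeys ext) ip t := by
  intro ip
  induction ip using Nat.strong_induction_on with
  | _ ip IH =>
    intro hip t proc hproc
    cases ip with
    | zero => simp [mainB]
    | succ n =>
      have hn : n < (skeys ext).length := by omega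
      set k := (skeys ext).getD n 0 with hkdef
      have hkB : PySem.List.pyGetD (skeys ext) (n : Int) 0 = k := PySem.List.pyGetD_natCast (skeys ext) n 0
      have hkext : k ∈ ext := getD_mem_ext ext n hn
      have htake : (skeys ext).take (n + 1) = (skeys ext).take n ++ [k] := by
        rw [List.take_succ]
        congr 1
        rw [List.getElem?_eq_getElem hn]
        simp [hkdef, List.getD_eq_getElem _ _ hn, List.getElem?_eq_getElem hn]
      have hknp : k ∉ proc := by
        intro hc
        obtain ⟨j, hj1, hj2, hj3⟩ := (mem_drop_iff ext (n + 1) k).mp ((hproc k).mp hc)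
        have := skeys_getD_lt ext (show n < j by omega) hj2
        rw [hj3] at this
        omega
      rw [htake]
      have hrev : ((skeys ext).take n ++ [k]).reverse = k :: ((skeys ext).take n).reverse := by simp
      rw [hrev, List.foldl_cons]
      rw [stepA, if_neg hknp]
      by_cases hexp : 1 < ((rpOf ext).getD k []).length
      · -- branch component
        rw [if_pos hexp]
        have hindeg : 1 < indegB (cntOf ext) k := (indeg_len ext k hkext).mpr hexp
        have hkeys : (rpOf ext).keys.length = (KS ext).length := by rw [rp_keys]
        have hnp : partitionSrc ((rpOf ext).keys.length + 2) k (rpOf ext) PySem.Set.empty =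
            npOf ext k := by rw [hkeys, npOf]
        set mC := mCOf ext k with hmC
        have hgdne : (rpOf ext).getD k [] ≠ [] := by
          intro hc; rw [hc] at hexp; simp at hexp
        obtain ⟨hmpmem, hmpmin⟩ := minPred_spec ext k hkext hgdne
        set lo0 := minPredB (cntOf ext) k with hlo0
        have hlo0k : lo0 ≤ k - 1 := by
          have := (mem_rp ext k lo0).mp hmpmem
          omega
        have hreach0 : ReachG ext k lo0 :=
          Relation.ReflTransGen.tail Relation.ReflTransGen.refl ⟨hexp, hmpmem⟩
        have hmCk : mC ≤ k := (mC_spec ext k).2 k Relation.ReflTransGen.refl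
        -- walk
        have hw := walk_spec ext n hn (by rw [← hkdef]; exact hexp) n lo0 le_rfl
          (by rw [← hkdef]; exact hreach0) (by rw [← hkdef]) (by omega)
        set r := walkB (cntOf ext) (skeys ext) n lo0 with hr
        obtain ⟨hjf_le, hlof_le, hreachf, hHf, hvals, hstop⟩ := hw
        have hlof : r.2 = mC := by
          have hle1 : mC ≤ r.2 := (mC_spec ext k).2 r.2 hreachf
          rcases lt_or_eq_of_le hle1 with hlt | heq
          · exfalso
            obtain ⟨u, w, huw, hlou, hwlo, hku⟩ :=
              exists_cross ext (mC_spec ext k).1 hlt (by omega)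
            by_cases huk : u = k
            · rw [huk] at huw
              have := hmpmin w huw.2
              omega
            · have hule : u < k := lt_of_le_of_ne (reach_le ext hku) huk
              have huext : u ∈ ext := (relG_facts ext huw).2.1
              obtain ⟨j, hjlen, hjval⟩ := exists_idx ext ((mem_skeys ext u).mpr huext)
              have hjn : j < n := by
                by_contra hc
                have := skeys_getD_le ext (show n ≤ j by omega) hjlen
                rw [hjval] at this
                omega
              have hjf2 : r.1 ≤ j := by
                rcases hstop with h0 | hlt2
                · omega
                · by_contra hc
                  have := skeys_getD_le ext (show j ≤ r.1 - 1 by omega)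
                    (show r.1 - 1 < (skeys ext).length by omega)
                  rw [hjval] at this
                  omega
              have hu_indeg : 1 < indegB (cntOf ext) u := (indeg_len ext u huext).mpr huw.1
              have := hHf j hjf2 hjn (by rw [hjval]; exact hu_indeg)
              rw [hjval] at this
              have hune : (rpOf ext).getD u [] ≠ [] := by
                intro hc
                have hw2 := huw.2
                rw [hc] at hw2
                simp at hw2
              obtain ⟨-, humin⟩ := minPred_spec ext u huext hune
              have := humin w huw.2
              omega
          · exact heq.symm
        -- the interval of indices [r.1, n] is exactly the component
        have hvals' : ∀ j, r.1 ≤ j → j ≤ n → mC ≤ (skeys ext).getD j 0 := by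
          intro j h1 h2
          rcases Nat.eq_or_lt_of_le h2 with rfl | hlt
          · rw [← hkdef]; omega
          · rw [← hlof]; exact hvals j h1 hlt
        have hidx_lo : ∀ j, j < (skeys ext).length → mC ≤ (skeys ext).getD j 0 → r.1 ≤ j := by
          intro j hjlen hmCj
          rcases hstop with h0 | hlt2
          · omega
          · by_contra hc
            have := skeys_getD_le ext (show j ≤ r.1 - 1 by omega)
              (show r.1 - 1 < (skeys ext).length by omega)
            rw [hlof] at hlt2
            omega
        have hidx_hi : ∀ j, j < (skeys ext).length → (skeys ext).getD j 0 ≤ k → j ≤ n := by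
          intro j hjlen hkj
          by_contra hc
          have := skeys_getD_lt ext (show n < j by omega) hjlen
          omega
        have hslice : PySem.List.slice (skeys ext) (some (r.1 : Int)) (some ((n : Int) + 1)) =
            ((skeys ext).drop r.1).take (n + 1 - r.1) := by
          have hcast : ((n : Int) + 1) = ((n + 1 : Nat) : Int) := by push_cast; ring
          rw [hcast, PySem.List.slice_natCast]
        have hcomp_mem : ∀ x, x ∈ ((skeys ext).drop r.1).take (n + 1 - r.1) ↔
            x ∈ ext ∧ mC ≤ x ∧ x ≤ k := by
          intro x
          rw [mem_take_drop_iff]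
          constructor
          · rintro ⟨j, h1, h2, h3, rfl⟩
            refine ⟨getD_mem_ext ext j h3, hvals' j h1 (by omega), ?_⟩
            rw [hkdef]
            exact skeys_getD_le ext (by omega) hn
          · rintro ⟨hxext, hxmC, hxk⟩
            obtain ⟨j, hjlen, hjval⟩ := exists_idx ext ((mem_skeys ext x).mpr hxext)
            have h1 : r.1 ≤ j := hidx_lo j hjlen (by rw [hjval]; exact hxmC)
            have h2 : j ≤ n := hidx_hi j hjlen (by rw [hjval]; exact hxk)
            exact ⟨j, h1, by omega, hjlen, hjval⟩
        have hcomp_srt : (((skeys ext).drop r.1).take (n + 1 - r.1)).Pairwise (· < ·) := by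
          exact (skeys_lt ext).sublist
            ((List.take_sublist _ _).trans (List.drop_sublist _ _))
        have hkcomp : k ∈ ((skeys ext).drop r.1).take (n + 1 - r.1) :=
          (hcomp_mem k).mpr ⟨hkext, hmCk, le_rfl⟩
        -- DP table
        have hw0 : ∀ u, (PySem.Dict.empty.insert mC (1 : Int)).getD u 0 =
            if u = mC ∨ u ∈ ([] : List Int) then countF ext mC u else 0 := by
          intro u
          rw [PySem.Dict.getD_insert]
          by_cases hu : u = mC
          · rw [if_pos hu, if_pos (Or.inl hu), hu, countF_self]
          · rw [if_neg hu, if_neg (by simp [hu]), PySem.Dict.getD_empty]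
        have hdp := dp_spec ext k mC (((skeys ext).drop r.1).take (n + 1 - r.1))
          hcomp_mem hcomp_srt (((skeys ext).drop r.1).take (n + 1 - r.1)) []
          (PySem.Dict.empty.insert mC 1) rfl hw0 k
        rw [List.nil_append] at hdp
        rw [if_pos (Or.inr hkcomp)] at hdp
        -- A's factor
        have hmax : (PySem.List.max? (partitionSrc ((rpOf ext).keys.length + 2) k (rpOf ext)
            PySem.Set.empty) (fun x => x)).getD 0 = k := by rw [hnp]; exact np_max ext k
        have hmin : (PySem.List.min? (partitionSrc ((rpOf ext).keys.length + 2) k (rpOf ext)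
            PySem.Set.empty) (fun x => x)).getD 0 = mC := by rw [hnp, hmC]; rfl
        have hbndk : bnd ext k < (rpOf ext).keys.length + 2 := by
          have := List.length_filter_le (fun u => decide (u ≤ k)) (KS ext)
          rw [hkeys]
          simp only [bnd]
          omega
        have hfactor : countPaths ((rpOf ext).keys.length + 2) (rpOf ext) k mC =
            countF ext mC k := countA_eq_countF ext _ k mC hbndk
        -- new processed set
        have hproc' : ∀ x, x ∈ PySem.Set.union proc (partitionSrc ((rpOf ext).keys.length + 2)
            k (rpOf ext) PySem.Set.empty) ↔ x ∈ (skeys ext).drop r.1 := by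
          intro x
          rw [PySem.Set.mem_union, hnp, np_mem, np_interval ext k hkext hexp, ← hmC, hproc]
          rw [mem_drop_iff, mem_drop_iff]
          constructor
          · rintro (⟨j, h1, h2, h3⟩ | ⟨hxext, h1, h2⟩)
            · exact ⟨j, by omega, h2, h3⟩
            · obtain ⟨j, hjlen, hjval⟩ := exists_idx ext ((mem_skeys ext x).mpr hxext)
              exact ⟨j, hidx_lo j hjlen (by rw [hjval]; exact h1), hjlen, hjval⟩
          · rintro ⟨j, h1, h2, h3⟩
            by_cases hj : n + 1 ≤ j
            · exact Or.inl ⟨j, hj, h2, h3⟩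
            · refine Or.inr ⟨by rw [← h3]; exact getD_mem_ext ext j h2, ?_, ?_⟩
              · rw [← h3]; exact hvals' j h1 (by omega)
              · rw [← h3, hkdef]; exact skeys_getD_le ext (by omega) hn
        -- skip the middle of A's scan
        have hsplit_take : (skeys ext).take n = (skeys ext).take r.1 ++ ((skeys ext).drop r.1).take (n - r.1) := by
          have : n = r.1 + (n - r.1) := by omega
          rw [this, List.take_add]
          simp
        have hmid : ∀ x ∈ (((skeys ext).drop r.1).take (n - r.1)).reverse,
            x ∈ PySem.Set.union proc (partitionSrc ((rpOf ext).keys.length + 2)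
              k (rpOf ext) PySem.Set.empty) := by
          intro x hx
          rw [List.mem_reverse] at hx
          obtain ⟨j, h1, h2, h3, h4⟩ := (mem_take_drop_iff ext r.1 (n - r.1) x).mp hx
          rw [hproc' x, mem_drop_iff]
          exact ⟨j, h1, h3, h4⟩
        rw [hsplit_take, List.reverse_append, List.foldl_append]
        rw [skip_fold _ _ _ _ hmid]
        -- rewrite A's state and recurse
        rw [hmax, hmin, hfactor]
        have hIH := IH r.1 (by omega) (by omega) (t * countF ext mC k)
          (PySem.Set.union proc (partitionSrc ((rpOf ext).keys.length + 2) k (rpOf ext)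
            PySem.Set.empty)) hproc'
        rw [hIH]
        -- B side
        have hB : mainB (cntOf ext) (skeys ext) (n + 1) t =
            mainB (cntOf ext) (skeys ext) r.1
              (t * ((PySem.List.slice (skeys ext) (some (r.1 : Int))
                  (some ((n : Int) + 1))).foldl (waysStep (cntOf ext) r.2)
                (PySem.Dict.empty.insert r.2 1)).getD k 0) := by
          conv_lhs => rw [mainB]
          rw [hkB, if_pos hindeg]
        rw [hB, hlof, hslice, hdp]
      · -- chain node
        rw [if_neg hexp]
        have hindeg : ¬ 1 < indegB (cntOf ext) k := fun hc =>
          hexp ((indeg_len ext k hkext).mp hc)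
        have hproc' : ∀ x, x ∈ PySem.Set.add proc k ↔ x ∈ (skeys ext).drop n := by
          intro x
          rw [PySem.Set.mem_add, hproc]
          rw [mem_drop_iff, mem_drop_iff]
          constructor
          · rintro (⟨j, h1, h2, h3⟩ | rfl)
            · exact ⟨j, by omega, h2, h3⟩
            · exact ⟨n, le_rfl, hn, rfl⟩
          · rintro ⟨j, h1, h2, h3⟩
            by_cases hj : n + 1 ≤ j
            · exact Or.inl ⟨j, hj, h2, h3⟩
            · have : j = n := by omega
              rw [this] at h3
              right
              rw [← h3, hkdef]
          
        have hIH := IH n (by omega) (by omega) t (PySem.Set.add proc k)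
          hproc'
        rw [hIH]
        conv_rhs => rw [mainB]
        rw [hkB, if_neg hindeg]

-- ===== VERDICT (by name: the statement is the Claim_ definition above) =====
theorem paths_for_spec : Claim_equal_paths_for := by
  intro data _hdom hpre
  unfold Spec_paths_for
  cases hg : PySem.List.pyGet? data (-1) with
  | none =>
    exfalso
    rw [PySem.List.pyGet?_eq_none_iff] at hg
    apply hg
    have : 0 < data.length := List.length_pos_iff.mpr hpre
    simp [PySem.Raise.InRange]
    omega
  | some last =>
    simp only [paths_for, paths_for_alt, hg]
    have h1 : PySem.List.sorted (rpOf ([0] ++ data ++ [last + 3])).keys (fun x => x) =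
        skeys ([0] ++ data ++ [last + 3]) := by
      rw [rp_keys]; rfl
    have h2 : PySem.List.sorted (cntOf ([0] ++ data ++ [last + 3])).keys (fun x => x) =
        skeys ([0] ++ data ++ [last + 3]) := by
      rw [cnt_keys]; rfl
    rw [h1, h2]
    have h3 := main_eq ([0] ++ data ++ [last + 3]) (skeys ([0] ++ data ++ [last + 3])).length
      le_rfl 1 PySem.Set.empty (by intro x; simp [PySem.Set.empty])
    rw [List.take_length] at h3
    exact h3
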